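-- pv_equiv track=rewrite | github.com/matferronato/TopologyGen | TopologyGen/source/Python/Machine_Configuration/configure_machines.py | returnNetworkName
-- ===== SOURCE A (Python) =====
-- def returnNetworkName(ip):
--     point = 0
--     currentIp = ""
--     for eachChar in ip:
--         if(point == 3):
--             break
--         if eachChar == '.':
--             point = point+1
--         currentIp = currentIp+eachChar
--     return  currentIp
-- ===== SOURCE B (Python) =====
-- def returnNetworkName(ip):
--     parts = ip.split('.')
--     if len(parts) <= 3:
--         return ip
--     return '.'.join(parts[:3]) + '.'
-- ===== Notes on version B (the rewrite author's own statement) =====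
-- stated objective: simpler
-- what changed: Replaces the character-by-character loop with a dot counter and repeated string concatenation by a field decomposition: split the string into fields, return the input when there are at most three fields, otherwise rejoin the first three fields and the trailing separator.
import Mathlib
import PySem

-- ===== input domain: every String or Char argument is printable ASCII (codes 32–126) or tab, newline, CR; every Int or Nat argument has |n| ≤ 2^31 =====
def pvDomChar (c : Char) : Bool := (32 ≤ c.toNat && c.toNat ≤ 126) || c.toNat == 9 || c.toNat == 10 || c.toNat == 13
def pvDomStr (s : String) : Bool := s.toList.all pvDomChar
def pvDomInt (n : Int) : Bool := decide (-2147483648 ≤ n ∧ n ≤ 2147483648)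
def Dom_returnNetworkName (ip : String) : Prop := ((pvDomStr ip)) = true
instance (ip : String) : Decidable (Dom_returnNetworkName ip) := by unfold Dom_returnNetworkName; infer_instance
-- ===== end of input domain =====

-- B replaces A's char-by-char loop with a dot counter by split-on-'.'/rejoin-first-three (simpler decomposition); same return value everywhere.

-- ===== PORT A =====
-- the for-loop of A: state = (point, currentIp); 'break' = returning the accumulator
def rnnLoop : List Char → Nat → List Char → List Char
  | [], _, acc => acc
  | c :: cs, point, acc =>
    if point == 3 then acc
    else rnnLoop cs (if c == '.' then point + 1 else point) (acc ++ [c])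

def returnNetworkName (ip : String) : String :=
  String.ofList (rnnLoop ip.toList 0 [])

-- ===== PORT B =====
def returnNetworkName_alt (ip : String) : String :=
  let parts := PySem.Chars.splitOn ip.toList ['.']
  if parts.length ≤ 3 then ip
  else String.ofList (PySem.Chars.join ['.'] (parts.take 3) ++ ['.'])

-- ===== PRECONDITION & SPEC =====
def Spec_returnNetworkName (ip : String) (out : String) : Prop := out = returnNetworkName_alt ip
instance (ip : String) (out : String) : Decidable (Spec_returnNetworkName ip out) := by unfold Spec_returnNetworkName; infer_instance

-- ===== CLAIM (what is proved, stated in full; the proofs are below) =====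
def Claim_equal_returnNetworkName : Prop := ∀ (ip : String), Dom_returnNetworkName ip → Spec_returnNetworkName ip (returnNetworkName ip)

-- ===== LEMMAS AND PROOFS =====

-- the pure content of A's loop: keep characters up to and including the n-th dot
def fDots : Nat → List Char → List Char
  | _, [] => []
  | n, c :: cs => if c = '.' then (if n = 1 then ['.'] else '.' :: fDots (n-1) cs) else c :: fDots n cs

-- reference single-character split, structural recursion
def splitDot : List Char → List (List Char)
  | [] => [[]]
  | c :: cs =>
    if c = '.' then [] :: splitDot cs
    else match splitDot cs with
      | p :: ps => (c :: p) :: ps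
      | [] => [[c]]

theorem splitDot_ne_nil (cs : List Char) : splitDot cs ≠ [] := by
  induction cs with
  | nil => simp [splitDot]
  | cons c cs ih =>
    simp only [splitDot]
    split
    · simp
    · cases h : splitDot cs with
      | nil => simp
      | cons p ps => simp

-- A's loop, stopped state
theorem rnnLoop_done (cs acc : List Char) : rnnLoop cs 3 acc = acc := by
  cases cs <;> simp [rnnLoop]

-- A's loop in terms of fDots
theorem rnnLoop_eq_fDots (cs : List Char) :
    ∀ (n : Nat) (acc : List Char), 1 ≤ n → n ≤ 3 → rnnLoop cs (3 - n) acc = acc ++ fDots n cs := by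
  induction cs with
  | nil => intro n acc h1 h3; simp [rnnLoop, fDots]
  | cons c cs ih =>
    intro n acc h1 h3
    have hb : (3 - n == 3) = false := by simp; omega
    by_cases hc : c = '.'
    · subst hc
      by_cases hn : n = 1
      · subst hn
        simp [rnnLoop, fDots, hb, rnnLoop_done]
      · have heq : 3 - n + 1 = 3 - (n - 1) := by omega
        have hrec := ih (n-1) (acc ++ ['.']) (by omega) (by omega)
        simp [rnnLoop, fDots, hn, hb, heq, hrec]
    · have hb2 : (c == '.') = false := by simp [hc]
      have hrec := ih n (acc ++ [c]) h1 h3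
      simp [rnnLoop, fDots, hb, hc, hb2, hrec]

-- fuel-based splitOn.go reduced to splitDot
theorem go_eq_splitDot (fuel : Nat) :
    ∀ (l cur : List Char) (acc : List (List Char)), l.length ≤ fuel →
      PySem.Chars.splitOn.go ['.'] fuel l cur acc =
        acc.reverse ++ (match splitDot l with
          | p :: ps => (cur.reverse ++ p) :: ps
          | [] => [cur.reverse]) := by
  induction fuel with
  | zero =>
    intro l cur acc h
    have : l = [] := by cases l <;> simp_all
    subst this
    simp [PySem.Chars.splitOn.go, splitDot]
  | succ f ih =>
    intro l cur acc h
    cases l with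
    | nil => simp [PySem.Chars.splitOn.go, splitDot]
    | cons c rest =>
      by_cases hc : c = '.'
      · subst hc
        have hpre : List.isPrefixOf ['.'] ('.' :: rest) = true := by
          simp [List.isPrefixOf]
        simp only [PySem.Chars.splitOn.go, hpre, if_true]
        have hd : List.drop ['.'].length ('.' :: rest) = rest := rfl
        rw [hd, ih rest [] (List.reverse cur :: acc) (by simpa using Nat.le_of_succ_le_succ h)]
        have hsd : splitDot ('.' :: rest) = [] :: splitDot rest := by simp [splitDot]
        rw [hsd]
        cases hs : splitDot rest with
        | nil => exact absurd hs (splitDot_ne_nil rest)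
        | cons p ps => simp
      · have hpre : List.isPrefixOf ['.'] (c :: rest) = false := by
          simp [List.isPrefixOf]; exact fun h => absurd h.symm hc
        simp only [PySem.Chars.splitOn.go, hpre, Bool.false_eq_true, if_false]
        rw [ih rest (c :: cur) acc (by simpa using Nat.le_of_succ_le_succ h)]
        cases hs : splitDot rest with
        | nil => exact absurd hs (splitDot_ne_nil rest)
        | cons p ps =>
          have hsd : splitDot (c :: rest) = (c :: p) :: ps := by simp [splitDot, hc, hs]
          rw [hsd]
          simp

theorem splitOn_eq_splitDot (cs : List Char) :
    PySem.Chars.splitOn cs ['.'] = splitDot cs := by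
  rw [PySem.Chars.splitOn, go_eq_splitDot (cs.length + 1) cs [] [] (by omega)]
  cases hs : splitDot cs with
  | nil => exact absurd hs (splitDot_ne_nil cs)
  | cons p ps => simp

-- B's value in terms of fDots
theorem fDots_eq_split (cs : List Char) :
    ∀ n : Nat, 1 ≤ n →
      (if (splitDot cs).length ≤ n then fDots n cs = cs
       else fDots n cs = PySem.Chars.join ['.'] ((splitDot cs).take n) ++ ['.']) := by
  induction cs with
  | nil => intro n h1; simp [splitDot, fDots, h1]
  | cons c cs ih =>
    intro n h1
    by_cases hc : c = '.'
    · subst hc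
      have hsd : splitDot ('.' :: cs) = [] :: splitDot cs := by simp [splitDot]
      rw [hsd]
      have hlen : 1 ≤ (splitDot cs).length := by
        cases hs : splitDot cs with
        | nil => exact absurd hs (splitDot_ne_nil cs)
        | cons p ps => simp
      by_cases hn : n = 1
      · subst hn
        rw [if_neg (by simp only [List.length_cons]; omega)]
        have : List.take 1 ([] :: splitDot cs) = [[]] := by simp
        rw [this]
        simp [fDots, PySem.Chars.join, List.intercalate]
      · have h2 : 2 ≤ n := by omega
        have ihh := ih (n-1) (by omega)
        have hf : fDots n ('.' :: cs) = '.' :: fDots (n-1) cs := by simp [fDots, hn]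
        rw [hf]
        by_cases hle : (splitDot cs).length ≤ n - 1
        · rw [if_pos (by simp only [List.length_cons]; omega)]
          rw [if_pos hle] at ihh
          simp [ihh]
        · rw [if_neg (by simp only [List.length_cons]; omega)]
          rw [if_neg hle] at ihh
          have htake : (([] : List Char) :: splitDot cs).take n = [] :: (splitDot cs).take (n-1) := by
            cases n with
            | zero => omega
            | succ m => rfl
          rw [htake, ihh]
          have hne : (splitDot cs).take (n-1) ≠ [] := by
            simp only [ne_eq, List.take_eq_nil_iff]
            rintro (h | h)
            · omega
            · exact splitDot_ne_nil cs h
          cases ht : (splitDot cs).take (n-1) with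
          | nil => exact absurd ht hne
          | cons q qs => simp [PySem.Chars.join, List.intercalate, List.intersperse]
    · cases hs : splitDot cs with
      | nil => exact absurd hs (splitDot_ne_nil cs)
      | cons p ps =>
        have hsd : splitDot (c :: cs) = (c :: p) :: ps := by simp [splitDot, hc, hs]
        rw [hsd]
        have ihh := ih n h1
        rw [hs] at ihh
        have hf : fDots n (c :: cs) = c :: fDots n cs := by simp [fDots, hc]
        rw [hf]
        simp only [List.length_cons] at ihh ⊢
        by_cases hle : ps.length + 1 ≤ n
        · rw [if_pos hle]
          rw [if_pos hle] at ihh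
          simp [ihh]
        · rw [if_neg hle]
          rw [if_neg hle] at ihh
          rw [ihh]
          have htake : ((c :: p) :: ps).take n = (c :: p) :: ps.take (n-1) := by
            cases n with
            | zero => omega
            | succ m => rfl
          have htake2 : (p :: ps).take n = p :: ps.take (n-1) := by
            cases n with
            | zero => omega
            | succ m => rfl
          rw [htake, htake2]
          cases ht : ps.take (n-1) with
          | nil => simp [PySem.Chars.join, List.intercalate]
          | cons q qs => simp [PySem.Chars.join, List.intercalate, List.intersperse]

-- ===== VERDICT (by name: the statement is the Claim_ definition above) =====
theorem returnNetworkName_spec : Claim_equal_returnNetworkName := by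
  intro ip _
  unfold Spec_returnNetworkName returnNetworkName returnNetworkName_alt
  have hA : rnnLoop ip.toList 0 [] = fDots 3 ip.toList := by
    have := rnnLoop_eq_fDots ip.toList 3 [] (by omega) (by omega)
    simpa using this
  have hB := fDots_eq_split ip.toList 3 (by omega)
  rw [splitOn_eq_splitDot]
  by_cases hle : (splitDot ip.toList).length ≤ 3
  · rw [if_pos hle] at hB ⊢
    rw [hA, hB, String.ofList_toList]
  · rw [if_neg hle] at hB ⊢
    rw [hA, hB]
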